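-- pv_equiv track=rewrite | github.com/krab11/code | python/problems/odd_even_subsequences.py | solve
-- ===== SOURCE A (Python) =====
-- def solve(A):
--     if A[0] % 2 == 0:
--         next_val = "odd"
--     else:
--         next_val = "even"
--     count = 1
--     for each in A[1:]:
--         if each % 2 == 0 and next_val == "even":
--             count += 1
--             next_val = "odd"
--         elif each % 2 != 0 and next_val == "odd":
--             count += 1
--             next_val = "even"
--     return count
-- ===== SOURCE B (Python) =====
-- def solve(A):
--     # Alternating-subsequence length = 1 + number of adjacent parity changes,
--     # computed arithmetically over adjacent pairs: (x - y) % 2 is 1 exactly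
--     # when x and y have different parity. Stateless pairwise sum, no branches.
--     return 1 + sum((x - y) % 2 for x, y in zip(A, A[1:]))
-- ===== Notes on version B (the rewrite author's own statement) =====
-- stated objective: alternative
-- what changed: Replaced the next-expected-parity state machine with a stateless arithmetic sum over adjacent pairs: 1 + sum((x - y) % 2 for x, y in zip(A, A[1:])), since (x-y)%2 counts exactly the parity changes.
import Mathlib
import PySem

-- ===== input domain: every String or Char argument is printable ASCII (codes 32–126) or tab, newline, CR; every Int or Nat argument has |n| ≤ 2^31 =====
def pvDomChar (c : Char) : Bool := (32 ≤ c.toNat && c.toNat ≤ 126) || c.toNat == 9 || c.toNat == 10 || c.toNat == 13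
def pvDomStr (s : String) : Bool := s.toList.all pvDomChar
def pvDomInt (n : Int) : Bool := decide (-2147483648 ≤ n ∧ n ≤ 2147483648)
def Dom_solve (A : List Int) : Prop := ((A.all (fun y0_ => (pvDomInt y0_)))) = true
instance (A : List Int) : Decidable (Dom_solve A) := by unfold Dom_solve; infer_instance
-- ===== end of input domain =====

-- B replaces A's next-expected-parity state machine with a stateless arithmetic sum over
-- adjacent pairs, 1 + Σ (x - y) % 2 over zip(A, A[1:]); same O(n) cost ('alternative').

-- ===== PORT A =====
-- A's loop over A[1:] with state (count, next_val : String)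
def solveStep (st : Int × String) (each : Int) : Int × String :=
  if PySem.Int.mod each 2 = 0 ∧ st.2 = "even" then (st.1 + 1, "odd")
  else if PySem.Int.mod each 2 ≠ 0 ∧ st.2 = "odd" then (st.1 + 1, "even")
  else st

def solveLoop (state : Int × String) (rest : List Int) : Int × String :=
  rest.foldl solveStep state

def solve (A : List Int) : Int :=
  match A with
  | [] => 0   -- unreachable under Pre_solve: Python raises IndexError on the head index
  | a :: rest =>
    let next_val : String := if PySem.Int.mod a 2 = 0 then "odd" else "even"
    (solveLoop (1, next_val) rest).1

-- ===== PORT B =====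
-- sum((x - y) % 2 for x, y in zip(A, A[1:])), folded left as Python's sum does
def solve_alt (A : List Int) : Int :=
  1 + (A.zip (PySem.List.slice A (some 1) none)).foldl
        (fun s p => s + PySem.Int.mod (p.1 - p.2) 2) 0

-- ===== PRECONDITION & SPEC =====
-- Pre_ excludes the empty list, on which A raises IndexError when indexing the first element.
def Pre_solve (A : List Int) : Prop := A ≠ []
instance (A : List Int) : Decidable (Pre_solve A) := by unfold Pre_solve; infer_instance
def pvWitness_solve : List Int := [3, 4, 4, 7]

def Spec_solve (A : List Int) (out : Int) : Prop := out = solve_alt A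
instance (A : List Int) (out : Int) : Decidable (Spec_solve A out) := by unfold Spec_solve; infer_instance

-- ===== CLAIM (what is proved, stated in full; the proofs are below) =====
def Claim_equal_solve : Prop := ∀ (A : List Int), Dom_solve A → Pre_solve A → Spec_solve A (solve A)

-- ===== LEMMAS AND PROOFS =====

-- number of parity changes along the chain, starting from previous parity p ∈ {0,1}
def pTrans (p : Int) (l : List Int) : Int :=
  match l with
  | [] => 0
  | y :: ys => (if PySem.Int.mod y 2 = p then 0 else 1) + pTrans (PySem.Int.mod y 2) ys

-- encode A's string state by the parity p of the last counted element
def strOf (p : Int) : String := if p = 0 then "odd" else "even"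

theorem pymod_two (z : Int) : PySem.Int.mod z 2 = z % 2 :=
  PySem.Int.mod_eq_emod_of_pos (by norm_num)

theorem solveLoop_eq_trans (rest : List Int) (p c : Int) (hp : p = 0 ∨ p = 1) :
    (solveLoop (c, strOf p) rest).1 = c + pTrans p rest := by
  induction rest generalizing p c with
  | nil => simp [solveLoop, pTrans]
  | cons y ys ih =>
    have hcons : ∀ st : Int × String, solveLoop st (y :: ys) = solveLoop (solveStep st y) ys :=
      fun _ => rfl
    have hm := pymod_two y
    rcases Int.emod_two_eq y with hy | hy <;> rcases hp with hp | hp <;> subst hp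
    · -- p = 0, y even : state unchanged
      have hd : (2 : Int) ∣ y := by omega
      have h1 : solveStep (c, strOf 0) y = (c, strOf 0) := by simp [solveStep, strOf, hd]
      rw [hcons, h1, ih 0 c (Or.inl rfl)]
      simp [pTrans, hm, hy]
    · -- p = 1, y even : count, new p = 0
      have hd : (2 : Int) ∣ y := by omega
      have h1 : solveStep (c, strOf 1) y = (c + 1, strOf 0) := by simp [solveStep, strOf, hd]
      rw [hcons, h1, ih 0 (c + 1) (Or.inl rfl)]
      simp [pTrans, hm, hy]
      ring
    · -- p = 0, y odd : count, new p = 1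
      have h1 : solveStep (c, strOf 0) y = (c + 1, strOf 1) := by
        simp [solveStep, strOf, hm, hy]
      rw [hcons, h1, ih 1 (c + 1) (Or.inr rfl)]
      simp [pTrans, hm, hy]
      ring
    · -- p = 1, y odd : state unchanged
      have h1 : solveStep (c, strOf 1) y = (c, strOf 1) := by
        simp [solveStep, strOf, hm, hy]
      rw [hcons, h1, ih 1 c (Or.inr rfl)]
      simp [pTrans, hm, hy]

theorem foldl_add_mod (l : List (Int × Int)) (c : Int) :
    l.foldl (fun s p => s + PySem.Int.mod (p.1 - p.2) 2) c
      = c + l.foldl (fun s p => s + PySem.Int.mod (p.1 - p.2) 2) 0 := by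
  induction l generalizing c with
  | nil => simp
  | cons p ps ih =>
    simp only [List.foldl_cons]
    rw [ih (c + _), ih (0 + _)]
    ring

theorem zipSum_eq_trans (rest : List Int) (a : Int) :
    ((a :: rest).zip rest).foldl (fun s p => s + PySem.Int.mod (p.1 - p.2) 2) 0
      = pTrans (PySem.Int.mod a 2) rest := by
  induction rest generalizing a with
  | nil => simp [pTrans]
  | cons y ys ih =>
    have h : ((a :: y :: ys).zip (y :: ys)) = (a, y) :: ((y :: ys).zip ys) := rfl
    rw [h, List.foldl_cons, foldl_add_mod, ih y]
    have : PySem.Int.mod (a - y) 2 = (if PySem.Int.mod y 2 = PySem.Int.mod a 2 then 0 else 1) := by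
      rw [pymod_two, pymod_two, pymod_two]
      rcases Int.emod_two_eq a with ha | ha <;> rcases Int.emod_two_eq y with hy | hy <;>
        simp [ha, hy] <;> omega
    rw [this, pTrans]
    ring

-- ===== VERDICT =====
theorem solve_spec : Claim_equal_solve := by
  intro A _ hpre
  unfold Spec_solve
  match A with
  | [] => exact absurd rfl hpre
  | a :: rest =>
    have ha : PySem.Int.mod a 2 = 0 ∨ PySem.Int.mod a 2 = 1 := by
      rw [pymod_two]; rcases Int.emod_two_eq a with h | h <;> omega
    have hs : (if PySem.Int.mod a 2 = 0 then "odd" else "even") = strOf (PySem.Int.mod a 2) := by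
      rcases ha with h | h <;> rw [h] <;> simp [strOf]
    have hslice : PySem.List.slice (a :: rest) (some 1) none = rest := by
      simp [PySem.List.slice_from]
    simp only [solve, solve_alt, hs, hslice]
    rw [solveLoop_eq_trans rest (PySem.Int.mod a 2) 1 ha, zipSum_eq_trans rest a]
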